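-- pv_equiv track=rewrite | github.com/LeMustelide/entrainement-projet-M1S2 | code.py | question3_1_2
-- ===== SOURCE A (Python) =====
-- def question3_1_2(alphabet):
--
--     ensMotPeriodique=[]
--
--     for l1 in alphabet:
--         for l2 in alphabet:
--             for l3 in alphabet:
--                 periode = ""
--                 periode += l1
--                 periode += l2
--                 periode += l3
--                 ensMotPeriodique.append(periode*10)
--
--     return ensMotPeriodique
-- ===== SOURCE B (Python) =====
-- def question3_1_2(alphabet):
--     letters = list(alphabet)
--     n = len(letters)
--     result = []
--     for i in range(n * n * n):
--         a = letters[i // (n * n)]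
--         b = letters[(i // n) % n]
--         c = letters[i % n]
--         result.append((a + b + c) * 10)
--     return result
-- ===== Notes on version B (the rewrite author's own statement) =====
-- stated objective: alternative
-- what changed: Replaced the three nested for-loops over the alphabet by a single flat loop over range(n^3) that decodes each index as a base-n number to pick the three letters.
import Mathlib
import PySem

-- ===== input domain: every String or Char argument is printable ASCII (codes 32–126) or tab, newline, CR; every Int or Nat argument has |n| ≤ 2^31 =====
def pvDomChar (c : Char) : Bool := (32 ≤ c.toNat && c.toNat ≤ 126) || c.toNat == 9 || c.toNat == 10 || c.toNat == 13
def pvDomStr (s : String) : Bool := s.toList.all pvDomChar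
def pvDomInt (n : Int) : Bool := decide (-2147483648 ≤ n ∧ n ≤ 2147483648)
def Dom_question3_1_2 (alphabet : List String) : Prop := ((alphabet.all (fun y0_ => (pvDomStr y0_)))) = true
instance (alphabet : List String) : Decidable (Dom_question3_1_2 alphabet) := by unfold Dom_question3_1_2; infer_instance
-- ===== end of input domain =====

-- B replaces A's three nested loops by one flat loop over range(n^3) decoding the
-- index in base n (objective: alternative decomposition, same output order; no speed claim).

-- shared helper: Python's  s * k  for a string (concatenate k copies)
def pyStrMul (s : String) (k : Nat) : String := String.join (List.replicate k s)

-- ===== PORT A =====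
def question3_1_2 (alphabet : List String) : List String :=
  alphabet.foldl (fun acc l1 =>
    alphabet.foldl (fun acc l2 =>
      alphabet.foldl (fun acc l3 =>
        let periode := ""
        let periode := periode ++ l1
        let periode := periode ++ l2
        let periode := periode ++ l3
        acc ++ [pyStrMul periode 10]) acc) acc) []

-- ===== PORT B =====
def question3_1_2_alt (alphabet : List String) : List String :=
  let letters := alphabet
  let n := letters.length
  (List.range (n * n * n)).foldl (fun result i =>
    let a := letters.getD (i / (n * n)) ""
    let b := letters.getD ((i / n) % n) ""
    let c := letters.getD (i % n) ""
    result ++ [pyStrMul (a ++ b ++ c) 10]) []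

-- ===== PRECONDITION & SPEC =====
def Spec_question3_1_2 (alphabet : List String) (out : List String) : Prop := out = question3_1_2_alt alphabet
instance (alphabet : List String) (out : List String) : Decidable (Spec_question3_1_2 alphabet out) := by unfold Spec_question3_1_2; infer_instance

-- ===== CLAIM (what is proved, stated in full; the proofs are below) =====
def Claim_equal_question3_1_2 : Prop := ∀ (alphabet : List String), Dom_question3_1_2 alphabet → Spec_question3_1_2 alphabet (question3_1_2 alphabet)

-- ===== LEMMAS AND PROOFS =====

-- range over a product, decoded as (quotient, remainder)
theorem range_mul_map {α : Type} (n m : Nat) (f : Nat → α) :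
    (List.range (n * m)).map f
      = (List.range n).flatMap (fun i => (List.range m).map (fun j => f (i * m + j))) := by
  induction n with
  | zero => simp
  | succ k ih =>
      have h : (k + 1) * m = k * m + m := by ring
      rw [h, List.range_add, List.map_append, List.range_succ, List.flatMap_append, ih]
      simp [List.map_map, Function.comp, Nat.add_comm, Nat.mul_comm]

-- mapping an indexed read over range l.length is mapping over l
theorem map_getD_range {α β : Type} (l : List α) (d : α) (g : α → β) :
    (List.range l.length).map (fun i => g (l.getD i d)) = l.map g := by
  induction l with
  | nil => simp
  | cons x xs ih =>
      rw [List.length_cons, List.range_succ_eq_map]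
      simp only [List.map_cons, List.map_map]
      simpa using ih

theorem flatMap_getD_range {α β : Type} (l : List α) (d : α) (g : α → List β) :
    (List.range l.length).flatMap (fun i => g (l.getD i d)) = l.flatMap g := by
  induction l with
  | nil => simp
  | cons x xs ih =>
      rw [List.length_cons, List.range_succ_eq_map]
      simp only [List.flatMap_cons, List.flatMap_map]
      simpa using ih

theorem decode_div_mod (n a b c : Nat) (ha : a < n) (hb : b < n) (hc : c < n) :
    (a * (n * n) + (b * n + c)) / (n * n) = a
    ∧ ((a * (n * n) + (b * n + c)) / n) % n = b
    ∧ (a * (n * n) + (b * n + c)) % n = c := by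
  have hn : 0 < n := by omega
  have hlt : b * n + c < n * n := by
    calc b * n + c < b * n + n := by omega
    _ = (b + 1) * n := by ring
    _ ≤ n * n := Nat.mul_le_mul_right n hb
  have hrw : a * (n * n) + (b * n + c) = (a * n + b) * n + c := by ring
  refine ⟨?_, ?_, ?_⟩
  · rw [Nat.mul_comm a (n * n), Nat.mul_add_div (by positivity), Nat.div_eq_of_lt hlt]
    omega
  · rw [hrw, Nat.mul_comm (a * n + b) n, Nat.mul_add_div hn, Nat.div_eq_of_lt hc,
      Nat.add_zero, Nat.mul_comm a n, Nat.mul_add_mod, Nat.mod_eq_of_lt hb]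
  · rw [hrw, Nat.mul_comm (a * n + b) n, Nat.mul_add_mod, Nat.mod_eq_of_lt hc]

theorem question3_1_2_eq (al : List String) : question3_1_2 al = question3_1_2_alt al := by
  unfold question3_1_2 question3_1_2_alt
  simp only [PySem.List.foldl_append_eq_flatMap,
    List.nil_append, String.empty_append]
  simp only [← List.map_eq_flatMap]
  rw [show al.length * al.length * al.length = al.length * (al.length * al.length) from by ring,
    range_mul_map]
  have hcongr : (List.range al.length).flatMap (fun a =>
      (List.range (al.length * al.length)).map (fun j =>
        pyStrMul (al.getD ((a * (al.length * al.length) + j) / (al.length * al.length)) "" ++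
          al.getD (((a * (al.length * al.length) + j) / al.length) % al.length) "" ++
          al.getD ((a * (al.length * al.length) + j) % al.length) "") 10))
      = (List.range al.length).flatMap (fun a =>
      (List.range al.length).flatMap (fun b => (List.range al.length).map (fun c =>
        pyStrMul (al.getD a "" ++ al.getD b "" ++ al.getD c "") 10))) := by
    refine List.flatMap_congr (fun a ha => ?_)
    rw [range_mul_map]
    refine List.flatMap_congr (fun b hb => ?_)
    refine List.map_congr_left (fun c hc => ?_)
    have ha' := List.mem_range.mp ha
    have hb' := List.mem_range.mp hb
    have hc' := List.mem_range.mp hc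
    obtain ⟨h1, h2, h3⟩ := decode_div_mod al.length a b c ha' hb' hc'
    rw [h1, h2, h3]
  rw [hcongr,
    flatMap_getD_range al "" (fun x => (List.range al.length).flatMap (fun b =>
      (List.range al.length).map (fun c => pyStrMul (x ++ al.getD b "" ++ al.getD c "") 10)))]
  refine List.flatMap_congr (fun x _ => ?_)
  rw [flatMap_getD_range al "" (fun y => (List.range al.length).map (fun c =>
      pyStrMul (x ++ y ++ al.getD c "") 10))]
  refine List.flatMap_congr (fun y _ => ?_)
  rw [map_getD_range al "" (fun z => pyStrMul (x ++ y ++ z) 10)]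

-- ===== VERDICT (by name: the statement is the Claim_ definition above) =====
theorem question3_1_2_spec : Claim_equal_question3_1_2 := by
  intro al _
  unfold Spec_question3_1_2
  exact question3_1_2_eq al
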